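-- pv_equiv track=rewrite | github.com/rahul18cracker/common-investor | backend/app/nlp/research_agent/harness/grounding.py | has_claim_signal
-- ===== SOURCE A (Python) =====
-- NEGATION_WINDOW = 4
--
-- NEGATION_WORDS = frozenset(
--     [
--         "not",
--         "no",
--         "isn't",
--         "isnt",
--         "aren't",
--         "arent",
--         "wasn't",
--         "wasnt",
--         "hasn't",
--         "hasnt",
--         "without",
--         "lack",
--         "lacks",
--         "lacking",
--         "neither",
--         "never",
--         "barely",
--         "hardly",
--         "unlikely",
--         "despite",
--     ]
-- )
--
-- def has_claim_signal(text: str, signals: list[str]) -> bool: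
--     """Check if any signal word appears in text without a preceding negation."""
--     text_lower = text.lower()
--     words = text_lower.split()
--     for signal in signals:
--         signal_lower = signal.lower()
--         for i, word in enumerate(words):
--             if signal_lower in word:
--                 window_start = max(0, i - NEGATION_WINDOW)
--                 preceding = words[window_start:i]
--                 if not any(w in NEGATION_WORDS for w in preceding):
--                     return True
--     return False
-- ===== SOURCE B (Python) =====
-- NEGATION_WINDOW = 4
--
-- NEGATION_WORDS = frozenset(
--     [
--         "not", "no", "isn't", "isnt", "aren't", "arent", "wasn't", "wasnt",
--         "hasn't", "hasnt", "without", "lack", "lacks", "lacking", "neither",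
--         "never", "barely", "hardly", "unlikely", "despite",
--     ]
-- )
--
--
-- def has_claim_signal(text: str, signals: list[str]) -> bool:
--     """Single left-to-right pass over the words, keeping a distance-since-last-
--     negation counter instead of re-scanning a 4-word window per match."""
--     sigs = [s.lower() for s in signals]
--     gap = NEGATION_WINDOW + 1  # no negation word seen within the window yet
--     for word in text.lower().split():
--         if gap > NEGATION_WINDOW and any(s in word for s in sigs):
--             return True
--         gap = 1 if word in NEGATION_WORDS else gap + 1
--     return False
-- ===== Notes on version B (the rewrite author's own statement) =====
-- stated objective: alternative
-- what changed: B replaces A's per-signal rescan of the word list with per-match 4-word window slices by one left-to-right pass that maintains a distance-since-last-negation counter, testing signals only at positions the counter marks clean.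
import Mathlib
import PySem

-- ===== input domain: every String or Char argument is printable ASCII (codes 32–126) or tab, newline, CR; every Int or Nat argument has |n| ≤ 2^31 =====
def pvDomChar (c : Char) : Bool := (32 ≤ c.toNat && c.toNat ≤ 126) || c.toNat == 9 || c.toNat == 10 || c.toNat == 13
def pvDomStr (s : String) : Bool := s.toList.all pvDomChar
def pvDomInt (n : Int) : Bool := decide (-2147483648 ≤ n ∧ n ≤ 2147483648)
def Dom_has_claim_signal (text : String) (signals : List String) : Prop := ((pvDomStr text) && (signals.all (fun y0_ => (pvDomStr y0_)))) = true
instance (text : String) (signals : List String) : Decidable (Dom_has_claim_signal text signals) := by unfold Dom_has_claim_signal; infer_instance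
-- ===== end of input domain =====

-- B replaces A's per-signal rescan (with a 4-word window slice at every match) by one
-- left-to-right pass that maintains a distance-since-last-negation counter; return value only.

-- ===== PORT A =====
def pvNegationWords : List String :=
  ["not", "no", "isn't", "isnt", "aren't", "arent", "wasn't", "wasnt",
   "hasn't", "hasnt", "without", "lack", "lacks", "lacking", "neither",
   "never", "barely", "hardly", "unlikely", "despite"]

def has_claim_signal (text : String) (signals : List String) : Bool :=
  let text_lower := PySem.Str.lower text
  let words := PySem.Str.split₀ text_lower
  signals.any (fun signal =>
    let signal_lower := PySem.Str.lower signal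
    (PySem.List.enumerate words).any (fun iw =>
      if PySem.Str.isIn signal_lower iw.2 then
        let window_start : Int := max 0 (iw.1 - 4)
        let preceding := PySem.List.slice words (some window_start) (some iw.1)
        !(preceding.any (fun w => pvNegationWords.contains w))
      else false))

-- ===== PORT B =====
def pvGapLoop (sigs : List String) : List String → Nat → Bool
  | [], _ => false
  | w :: ws, gap =>
    if decide (4 < gap) && sigs.any (fun s => PySem.Str.isIn s w) then true
    else pvGapLoop sigs ws (if pvNegationWords.contains w then 1 else gap + 1)

def has_claim_signal_alt (text : String) (signals : List String) : Bool :=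
  pvGapLoop (signals.map PySem.Str.lower) (PySem.Str.split₀ (PySem.Str.lower text)) 5

-- ===== PRECONDITION & SPEC =====
def Spec_has_claim_signal (text : String) (signals : List String) (out : Bool) : Prop := out = has_claim_signal_alt text signals
instance (text : String) (signals : List String) (out : Bool) : Decidable (Spec_has_claim_signal text signals out) := by unfold Spec_has_claim_signal; infer_instance

-- ===== CLAIM (what is proved, stated in full; the proofs are below) =====
def Claim_equal_has_claim_signal : Prop := ∀ (text : String) (signals : List String), Dom_has_claim_signal text signals → Spec_has_claim_signal text signals (has_claim_signal text signals)

-- ===== LEMMAS AND PROOFS =====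

-- `past` is the reversed list of already-consumed words; clean = no negation in the last 4.
def pvClean (past : List String) : Bool :=
  !((past.take 4).any (fun w => pvNegationWords.contains w))

-- common reference form of the scan: at each word, clean window && some signal matches
def pvSpecAux (sigs : List String) (past : List String) : List String → Bool
  | [] => false
  | w :: ws => (pvClean past && sigs.any (fun s => PySem.Str.isIn s w)) || pvSpecAux sigs (w :: past) ws

lemma pv_any_swap {α β : Type} (xs : List α) (ys : List β) (p : α → β → Bool) :
    xs.any (fun a => ys.any (fun b => p a b)) = ys.any (fun b => xs.any (fun a => p a b)) := by
  rw [Bool.eq_iff_iff]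
  simp only [List.any_eq_true]
  tauto

lemma pv_any_and_right {α : Type} (xs : List α) (p : α → Bool) (c : Bool) :
    xs.any (fun a => p a && c) = (xs.any p && c) := by
  cases c <;> simp

-- the slice A takes at index past.length of past.reverse ++ rest is the last ≤4 consumed words
lemma pv_slice_window (past rest : List String) :
    PySem.List.slice (past.reverse ++ rest) (some (max 0 ((past.length : Int) - 4))) (some (past.length : Int))
      = (past.take 4).reverse := by
  by_cases h : past.length ≤ 4
  · have h0 : max 0 ((past.length : Int) - 4) = ((0 : Nat) : Int) := by
      simp; omega
    rw [h0, PySem.List.slice_natCast]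
    simp only [List.drop_zero, Nat.sub_zero]
    rw [List.take_append_of_le_length (by simp),
        List.take_of_length_le (by simp), List.take_of_length_le h]
  · have h0 : max 0 ((past.length : Int) - 4) = ((past.length - 4 : Nat) : Int) := by
      omega
    rw [h0, PySem.List.slice_natCast]
    have hlen : past.length - (past.length - 4) = 4 := by omega
    rw [List.drop_append_of_le_length (by simp), hlen]
    rw [List.take_append_of_le_length (by simp; omega)]
    rw [List.reverse_take, List.take_of_length_le (by simp; omega)]

-- A's enumerate-scan (signals already folded in) equals the reference scan
lemma pv_enum_spec (sigs words : List String) :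
    ∀ (ws past : List String), words = past.reverse ++ ws →
    (PySem.List.enumerate ws ((past.length : Nat) : Int)).any
      (fun iw => (sigs.any (fun s => PySem.Str.isIn s iw.2)) &&
        !((PySem.List.slice words (some (max 0 (iw.1 - 4))) (some iw.1)).any
            (fun w => pvNegationWords.contains w)))
      = pvSpecAux sigs past ws := by
  intro ws
  induction ws with
  | nil => intro past hw; simp [pvSpecAux, PySem.List.enumerate]
  | cons w ws ih =>
    intro past hw
    rw [PySem.List.enumerate_cons, List.any_cons]
    simp only [pvSpecAux]
    congr 1
    · rw [hw, pv_slice_window past (w :: ws)]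
      simp [pvClean, Bool.and_comm, List.any_reverse]
    · have h1 : ((past.length : Nat) : Int) + 1 = (((w :: past).length : Nat) : Int) := by
        simp [List.length_cons]
      rw [h1, ih (w :: past) (by simpa using hw)]

-- B's gap-counter loop equals the reference scan
lemma pv_gap_spec (sigs : List String) :
    ∀ (ws past : List String) (gap : Nat), 1 ≤ gap →
    (∀ k : Nat, 1 ≤ k → k ≤ 4 →
        decide (k < gap) = !((past.take k).any (fun w => pvNegationWords.contains w))) →
    pvGapLoop sigs ws gap = pvSpecAux sigs past ws := by
  intro ws
  induction ws with
  | nil => intro past gap _ _; simp [pvGapLoop, pvSpecAux]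
  | cons w ws ih =>
    intro past gap hgap hinv
    simp only [pvGapLoop, pvSpecAux, pvClean]
    rw [hinv 4 (by omega) (by omega)]
    cases hc : (!((past.take 4).any fun w => pvNegationWords.contains w) && sigs.any fun s => PySem.Str.isIn s w) with
    | true => simp
    | false =>
      simp only [Bool.false_eq_true, if_false, Bool.false_or]
      cases hn : pvNegationWords.contains w with
      | true =>
        rw [if_pos rfl]
        refine ih (w :: past) 1 (by omega) ?_
        intro k hk1 hk4
        have hn' : w ∈ pvNegationWords := by simpa using hn
        rcases k with _ | j
        · omega
        · simp [List.take_succ_cons, hn']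
      | false =>
        rw [if_neg (by simp)]
        refine ih (w :: past) (gap + 1) (by omega) ?_
        intro k hk1 hk4
        have hn' : w ∉ pvNegationWords := by simpa using hn
        rcases k with _ | j
        · omega
        · rcases j with _ | i
          · have hg : decide (1 < gap + 1) = true := by
              rw [decide_eq_true_iff]; omega
            rw [hg]
            simp [List.take_succ_cons, hn']
          · have h2 : decide (i + 2 < gap + 1) = decide (i + 1 < gap) := by
              rw [decide_eq_decide]; omega
            rw [h2, hinv (i + 1) (by omega) (by omega)]
            simp [List.take_succ_cons, hn']

-- ===== VERDICT (by name: the statement is the Claim_ definition above) =====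
theorem has_claim_signal_spec : Claim_equal_has_claim_signal := by
  intro text signals _
  unfold Spec_has_claim_signal
  have hA : has_claim_signal text signals
      = (signals.any fun signal =>
          (PySem.List.enumerate (PySem.Str.split₀ (PySem.Str.lower text))).any fun iw =>
            if PySem.Str.isIn (PySem.Str.lower signal) iw.2 then
              !((PySem.List.slice (PySem.Str.split₀ (PySem.Str.lower text))
                  (some (max 0 (iw.1 - 4))) (some iw.1)).any
                  (fun w => pvNegationWords.contains w))
            else false) := rfl
  have hB : has_claim_signal_alt text signals
      = pvGapLoop (signals.map PySem.Str.lower) (PySem.Str.split₀ (PySem.Str.lower text)) 5 := rfl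
  rw [hA, hB]
  set words := PySem.Str.split₀ (PySem.Str.lower text) with hwords
  have hIf : ∀ (sl : String) (iw : Int × String),
      (if PySem.Str.isIn sl iw.2 then
        !((PySem.List.slice words (some (max 0 (iw.1 - 4))) (some iw.1)).any
            (fun w => pvNegationWords.contains w))
      else false)
      = (PySem.Str.isIn sl iw.2 &&
          !((PySem.List.slice words (some (max 0 (iw.1 - 4))) (some iw.1)).any
              (fun w => pvNegationWords.contains w))) := by
    intro sl iw
    cases PySem.Str.isIn sl iw.2 <;> simp
  simp only [hIf]
  rw [pv_any_swap signals (PySem.List.enumerate words)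
    (fun signal iw => PySem.Str.isIn (PySem.Str.lower signal) iw.2 &&
        !((PySem.List.slice words (some (max 0 (iw.1 - 4))) (some iw.1)).any
            (fun w => pvNegationWords.contains w)))]
  have hstep : ∀ iw : Int × String,
      (signals.any fun signal => PySem.Str.isIn (PySem.Str.lower signal) iw.2 &&
          !((PySem.List.slice words (some (max 0 (iw.1 - 4))) (some iw.1)).any
              (fun w => pvNegationWords.contains w)))
      = (((signals.map PySem.Str.lower).any fun s => PySem.Str.isIn s iw.2) &&
          !((PySem.List.slice words (some (max 0 (iw.1 - 4))) (some iw.1)).any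
              (fun w => pvNegationWords.contains w))) := by
    intro iw
    rw [← pv_any_and_right, List.any_map]
    rfl
  simp only [hstep]
  have h0 : (PySem.List.enumerate words (0 : Int))
      = PySem.List.enumerate words (((([] : List String).length : Nat)) : Int) := by norm_num
  rw [h0, pv_enum_spec (signals.map PySem.Str.lower) words words []
    (by rw [List.reverse_nil, List.nil_append])]
  refine (pv_gap_spec (signals.map PySem.Str.lower) words [] 5 (by omega) ?_).symm
  intro k hk1 hk4
  simp only [List.take_nil, List.any_nil, Bool.not_false]
  rw [decide_eq_true_iff]; omega
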